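-- pv_equiv track=rewrite | github.com/doodle-ghostt/ComputerProgrammingUltimatePythonRepository | 06ListsAndLoops/Assignment/main.py | sum_with_skips
-- ===== SOURCE A (Python) =====
-- def sum_with_skips(list1):
--     skip = False
--     total = 0
--     for num in list1:
--         if num == -1 and skip == False:
--             skip = True
--         elif num == -1 and skip == True:
--             skip = False
--         elif skip == False:
--             total = total + num
--     return total
-- ===== SOURCE B (Python) =====
-- def sum_with_skips(list1):
--     segs = []
--     cur = []
--     for num in list1:
--         if num == -1:
--             segs.append(cur)
--             cur = []
--         else:
--             cur.append(num)
--     segs.append(cur)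
--     total = 0
--     for seg in segs[::2]:
--         for x in seg:
--             total = total + x
--     return total
-- ===== Notes on version B (the rewrite author's own statement) =====
-- stated objective: alternative
-- what changed: B splits the list into segments at each -1 marker and sums only the even-indexed segments (segs[::2]), instead of A's one-pass boolean skip-toggle accumulator.
import Mathlib
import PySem

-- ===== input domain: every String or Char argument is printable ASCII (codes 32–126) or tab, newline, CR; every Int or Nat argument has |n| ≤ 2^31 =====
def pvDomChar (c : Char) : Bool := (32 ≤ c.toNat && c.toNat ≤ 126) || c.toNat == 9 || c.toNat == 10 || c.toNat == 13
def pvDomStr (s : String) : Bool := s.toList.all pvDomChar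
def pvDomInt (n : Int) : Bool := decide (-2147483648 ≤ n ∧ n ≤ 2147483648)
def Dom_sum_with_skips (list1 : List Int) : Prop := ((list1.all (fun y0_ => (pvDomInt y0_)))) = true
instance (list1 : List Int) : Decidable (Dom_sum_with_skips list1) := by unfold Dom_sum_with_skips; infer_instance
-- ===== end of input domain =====

-- B replaces A's skip-toggle accumulator by splitting the list into segments at each -1
-- and summing the even-indexed segments (alternative decomposition, same cost).

-- ===== PORT A =====
def pvAStep (st : Bool × Int) (num : Int) : Bool × Int :=
  if num = -1 ∧ st.1 = false then (true, st.2)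
  else if num = -1 ∧ st.1 = true then (false, st.2)
  else if st.1 = false then (st.1, st.2 + num)
  else st

def sum_with_skips (list1 : List Int) : Int :=
  (list1.foldl pvAStep (false, 0)).2

-- ===== PORT B =====
def pvBStep (st : List (List Int) × List Int) (num : Int) : List (List Int) × List Int :=
  if num = -1 then (st.1 ++ [st.2], []) else (st.1, st.2 ++ [num])

-- hand port of segs[::2] (PySem.List.slice has no step argument); exact:
-- every second element starting at index 0, as Python's extended slice does
def pvEveryOther : List (List Int) → List (List Int)
  | [] => []
  | [a] => [a]
  | a :: _ :: rest => a :: pvEveryOther rest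

def sum_with_skips_alt (list1 : List Int) : Int :=
  let st := list1.foldl pvBStep ([], [])
  let segs := st.1 ++ [st.2]
  (pvEveryOther segs).foldl (fun total seg => seg.foldl (fun t x => t + x) total) 0

-- ===== PRECONDITION & SPEC =====
def Spec_sum_with_skips (list1 : List Int) (out : Int) : Prop := out = sum_with_skips_alt list1
instance (list1 : List Int) (out : Int) : Decidable (Spec_sum_with_skips list1 out) := by unfold Spec_sum_with_skips; infer_instance

-- ===== CLAIM (what is proved, stated in full; the proofs are below) =====
def Claim_equal_sum_with_skips : Prop := ∀ (list1 : List Int), Dom_sum_with_skips list1 → Spec_sum_with_skips list1 (sum_with_skips list1)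

-- ===== LEMMAS AND PROOFS =====

-- sum of the even-indexed segments
def pvES (segs : List (List Int)) : Int := ((pvEveryOther segs).map List.sum).sum

theorem pv_inner_foldl (seg : List Int) (t : Int) :
    seg.foldl (fun t x => t + x) t = t + seg.sum := by
  induction seg generalizing t with
  | nil => simp
  | cons a r ih => simp [List.foldl, ih, add_assoc]

theorem pv_outer_foldl (segs : List (List Int)) (t : Int) :
    segs.foldl (fun total seg => seg.foldl (fun t x => t + x) total) t
      = t + (segs.map List.sum).sum := by
  induction segs generalizing t with
  | nil => simp
  | cons a r ih =>
    rw [List.foldl_cons, pv_inner_foldl, ih]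
    simp [add_assoc]

theorem pv_alt_eq_ES (l : List Int) :
    sum_with_skips_alt l
      = pvES ((l.foldl pvBStep ([], [])).1 ++ [(l.foldl pvBStep ([], [])).2]) := by
  simp [sum_with_skips_alt, pvES, pv_outer_foldl]

theorem pv_ES_append (segs : List (List Int)) (c : List Int) :
    pvES (segs ++ [c]) = pvES segs + (if segs.length % 2 = 0 then c.sum else 0) := by
  induction segs using pvEveryOther.induct with
  | case1 => simp [pvES, pvEveryOther]
  | case2 a => simp [pvES, pvEveryOther]
  | case3 a b rest ih =>
    simp only [List.cons_append, pvEveryOther, pvES, List.map_cons, List.sum_cons,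
      List.length_cons] at *
    rw [ih]
    by_cases h0 : rest.length % 2 = 0
    · rw [if_pos h0, if_pos (by omega : (rest.length + 1 + 1) % 2 = 0)]; ring
    · rw [if_neg h0, if_neg (by omega : ¬ (rest.length + 1 + 1) % 2 = 0)]; ring

theorem pv_stepA_neg (b : Bool) (t : Int) : pvAStep (b, t) (-1) = (!b, t) := by
  cases b <;> simp [pvAStep]

theorem pv_stepA_pos (b : Bool) (t n : Int) (h : ¬ n = -1) :
    pvAStep (b, t) n = (b, if b then t else t + n) := by
  cases b <;> simp [pvAStep, h]

theorem pv_invariant (l : List Int) :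
    ∀ (segs : List (List Int)) (cur : List Int) (total : Int),
      total = pvES (segs ++ [cur]) →
      (l.foldl pvAStep (decide (segs.length % 2 = 1), total)).2
        = pvES ((l.foldl pvBStep (segs, cur)).1 ++ [(l.foldl pvBStep (segs, cur)).2]) := by
  induction l with
  | nil => intro segs cur total h; simpa using h
  | cons n t ih =>
    intro segs cur total h
    by_cases hn : n = -1
    · subst hn
      have hskip : (!decide (segs.length % 2 = 1)) = decide ((segs ++ [cur]).length % 2 = 1) := by
        by_cases hp : segs.length % 2 = 1 <;> simp [hp, List.length_append] <;> omega
      have htot : total = pvES ((segs ++ [cur]) ++ [[]]) := by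
        rw [pv_ES_append (segs ++ [cur]) []]
        simpa using h
      simpa [List.foldl, pv_stepA_neg, pvBStep, hskip] using
        ih (segs ++ [cur]) [] total htot
    · by_cases hp : segs.length % 2 = 1
      · have htot : total = pvES (segs ++ [cur ++ [n]]) := by
          rw [pv_ES_append] at h ⊢
          have : ¬ segs.length % 2 = 0 := by omega
          simpa [this] using h
        simpa [List.foldl, pv_stepA_pos _ _ _ hn, pvBStep, hn, hp] using
          ih segs (cur ++ [n]) total htot
      · have htot : total + n = pvES (segs ++ [cur ++ [n]]) := by
          rw [pv_ES_append] at h ⊢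
          have h0 : segs.length % 2 = 0 := by omega
          simp [h0] at h ⊢
          rw [h]; ring
        simpa [List.foldl, pv_stepA_pos _ _ _ hn, pvBStep, hn, hp] using
          ih segs (cur ++ [n]) (total + n) htot

-- ===== VERDICT (by name: the statement is the Claim_ definition above) =====
theorem sum_with_skips_spec : Claim_equal_sum_with_skips := by
  intro l _
  show sum_with_skips l = sum_with_skips_alt l
  have h0 : (0 : Int) = pvES (([] : List (List Int)) ++ [[]]) := by
    simp [pvES, pvEveryOther]
  have := pv_invariant l [] [] 0 h0
  simpa [sum_with_skips, pv_alt_eq_ES] using this
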